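-- pv_equiv track=rewrite | github.com/jackyfang89/CS-440 | MP1/search_backup.py | astar_multiple_cost
-- ===== SOURCE A (Python) =====
-- from copy import deepcopy
--
-- class MST:
--     def __init__(self, objectives):
--         self.elements = {key: None for key in objectives}
--
--         # TODO: implement some distance between two objectives
--         # ... either compute the shortest path between them, or just use the manhattan distance between the objectives
--         self.distances   = {
--                 (i, j): self.DISTANCE(i, j)
--                 for i, j in self.cross(objectives)
--             }
--
--     # Prim's algorithm adds edges to the MST in sorted order as long as they don't create a cycle
--     def compute_mst_weight(self):
--         weight      = 0
--         for distance, i, j in sorted((self.distances[(i, j)], i, j) for (i, j) in self.distances):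
--             if self.unify(i, j):
--                 weight += distance
--         return weight
--
--     # helper checks the root of a node, in the process flatten the path to the root
--     def resolve(self, key):
--         path = []
--         root = key
--         while self.elements[root] is not None:
--             path.append(root)
--             root = self.elements[root]
--         for key in path:
--             self.elements[key] = root
--         return root
--
--     # helper checks if the two elements have the same root they are part of the same tree
--     # otherwise set the root of one to the other, connecting the trees
--     def unify(self, a, b):
--         ra = self.resolve(a)
--         rb = self.resolve(b)
--         if ra == rb:
--             return False
--         else:
--             self.elements[rb] = ra
--             return True
--
--     # helper that gets all pairs i,j for a list of keys
--     def cross(self, keys):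
--         return (x for y in (((i, j) for j in keys if i < j) for i in keys) for x in y)
--
--     def DISTANCE(self, obj_a, obj_b):
--         return manhattan(obj_a, obj_b)
--
-- def manhattan(a, b):
--     return abs(a[0] - b[0]) + abs(a[1] - b[1])
--
-- def astar_multiple_cost(curr, steps, points):
--     weights = []
--     for point in points:
--         temp = deepcopy(points)
--         temp.remove(point)
--         mst = MST(temp)
--         mst_weight = mst.compute_mst_weight()
--         cost = mst_weight + manhattan(curr, point) + steps
--         # cost = steps
--         # weights.append((cost, point))
--         weights.append(cost)
--
--     weights.sort()
--     return weights[0]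
-- ===== SOURCE B (Python) =====
-- # B: build ONE global sorted edge list over the distinct points and reuse it for every
-- # excluded point (filtering its edges out, with duplicate points sharing one full-set MST),
-- # instead of A's per-point rebuild-and-resort; running min instead of sort-and-index.
--
-- def _find(parent, v):
--     path = []
--     root = v
--     while parent[root] is not None:
--         path.append(root)
--         root = parent[root]
--     for k in path:
--         parent[k] = root
--     return root
--
-- def _kruskal(verts, edges, excl):
--     # MST weight of the distinct vertices `verts` minus `excl` (excl=None: all of them),
--     # scanning the pre-sorted global edge list and skipping edges touching `excl`.
--     parent = {}
--     for v in verts: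
--         if v != excl:
--             parent[v] = None
--     weight = 0
--     for d, a, b in edges:
--         if a == excl or b == excl:
--             continue
--         ra = _find(parent, a)
--         rb = _find(parent, b)
--         if ra != rb:
--             parent[rb] = ra
--             weight += d
--     return weight
--
-- def _all_edges(verts):
--     if not verts:
--         return []
--     i, rest = verts[0], verts[1:]
--     out = []
--     for j in rest:
--         a, b = (i, j) if i < j else (j, i)
--         out.append((abs(a[0] - b[0]) + abs(a[1] - b[1]), a, b))
--     return out + _all_edges(rest)
--
-- def astar_multiple_cost(curr, steps, points):
--     verts = list(dict.fromkeys(points))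
--     edges = sorted(_all_edges(verts))
--     counts = {}
--     for v in points:
--         counts[v] = counts.get(v, 0) + 1
--     w_full = _kruskal(verts, edges, None)
--     best = None
--     for p in verts:
--         w = w_full if counts[p] > 1 else _kruskal(verts, edges, p)
--         c = w + abs(curr[0] - p[0]) + abs(curr[1] - p[1]) + steps
--         if best is None or c < best:
--             best = c
--     return best
-- ===== Notes on version B (the rewrite author's own statement) =====
-- stated objective: faster
-- what changed: Instead of rebuilding the distance dict and re-sorting an edge list for every excluded point, B deduplicates the points once, builds and sorts one global edge list over the distinct points, and reuses it for each candidate (skipping edges that touch the excluded point, with duplicated points sharing a single full-set MST), tracking a running minimum instead of sorting the cost list.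
import Mathlib
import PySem

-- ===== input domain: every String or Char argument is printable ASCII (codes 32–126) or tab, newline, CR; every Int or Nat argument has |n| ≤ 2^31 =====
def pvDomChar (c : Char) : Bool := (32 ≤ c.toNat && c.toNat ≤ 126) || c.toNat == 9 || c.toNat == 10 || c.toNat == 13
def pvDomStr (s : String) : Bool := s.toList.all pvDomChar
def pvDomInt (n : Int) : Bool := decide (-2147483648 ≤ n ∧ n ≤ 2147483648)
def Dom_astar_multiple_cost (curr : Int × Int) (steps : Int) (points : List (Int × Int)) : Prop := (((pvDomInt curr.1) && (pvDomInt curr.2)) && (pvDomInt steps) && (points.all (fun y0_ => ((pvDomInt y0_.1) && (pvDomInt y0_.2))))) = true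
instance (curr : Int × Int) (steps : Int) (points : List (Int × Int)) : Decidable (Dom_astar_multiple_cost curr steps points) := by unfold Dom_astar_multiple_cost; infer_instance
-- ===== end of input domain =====

-- B builds one globally sorted edge list over the distinct points and reuses it for every
-- excluded point (duplicates share one full-set MST), instead of A's per-point rebuild-and-resort.

-- shared comparison helpers (Python's '<' on int tuples, and the sort key for (dist, i, j) triples)
def pvPairLt (i j : Int × Int) : Bool :=
  decide (i.1 < j.1 ∨ (i.1 = j.1 ∧ i.2 < j.2))

def pvKey (t : Int × (Int × Int) × (Int × Int)) :
    Lex (Int × Lex (Int × Lex (Int × Lex (Int × Int)))) :=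
  toLex (t.1, toLex (t.2.1.1, toLex (t.2.1.2, toLex (t.2.2.1, t.2.2.2))))

-- ===== PORT A =====
def pvManhattan (a b : Int × Int) : Int := |a.1 - b.1| + |a.2 - b.2|

-- MST.resolve's while-loop; the fuel only makes it total (Python just follows parent chains)
def pvResolveGoA (fuel : Nat) (d : PySem.Dict (Int × Int) (Option (Int × Int)))
    (root : Int × Int) (path : List (Int × Int)) : (Int × Int) × List (Int × Int) :=
  match fuel with
  | 0 => (root, path)
  | f + 1 =>
    match d.getD root none with   -- self.elements[root]; the key is always present in A's runs
    | none => (root, path)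
    | some nxt => pvResolveGoA f d nxt (path ++ [root])

def pvResolveA (fuel : Nat) (d : PySem.Dict (Int × Int) (Option (Int × Int)))
    (key : Int × Int) : (Int × Int) × PySem.Dict (Int × Int) (Option (Int × Int)) :=
  let rp := pvResolveGoA fuel d key []
  (rp.1, rp.2.foldl (fun d k => d.insert k (some rp.1)) d)

def pvUnifyA (fuel : Nat) (d : PySem.Dict (Int × Int) (Option (Int × Int)))
    (a b : Int × Int) : Bool × PySem.Dict (Int × Int) (Option (Int × Int)) :=
  let ra := pvResolveA fuel d a
  let rb := pvResolveA fuel ra.2 b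
  if ra.1 = rb.1 then (false, rb.2) else (true, rb.2.insert rb.1 (some ra.1))

-- MST.cross
def pvCrossA (keys : List (Int × Int)) : List ((Int × Int) × (Int × Int)) :=
  keys.flatMap (fun i => (keys.filter (fun j => pvPairLt i j)).map (fun j => (i, j)))

-- MST.__init__ + MST.compute_mst_weight
def pvMstA (objectives : List (Int × Int)) : Int :=
  let elements := objectives.foldl
    (fun d k => d.insert k (none : Option (Int × Int))) PySem.Dict.empty
  let distances := (pvCrossA objectives).foldl
    (fun d ij => d.insert ij (pvManhattan ij.1 ij.2)) PySem.Dict.empty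
  let triples := distances.keys.map (fun ij => (distances.getD ij 0, ij))  -- the key is always present
  let sortedE := PySem.List.sorted triples pvKey false
  (sortedE.foldl (fun st e =>
      let u := pvUnifyA elements.size st.2 e.2.1 e.2.2
      (if u.1 then st.1 + e.1 else st.1, u.2)) (0, elements)).1

def astar_multiple_cost (curr : Int × Int) (steps : Int) (points : List (Int × Int)) : Int :=
  let weights := points.foldl (fun ws point =>
      let temp := (PySem.List.remove? points point).getD []  -- point ∈ points, so remove? is some
      ws ++ [pvMstA temp + pvManhattan curr point + steps]) []
  PySem.List.pyGetD (PySem.List.sorted weights (fun x => x) false) 0 0  -- weights[0]: IndexError on [] → Pre_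

-- ===== PORT B =====
def pvFindGoB (fuel : Nat) (d : PySem.Dict (Int × Int) (Option (Int × Int)))
    (root : Int × Int) (path : List (Int × Int)) : (Int × Int) × List (Int × Int) :=
  match fuel with
  | 0 => (root, path)
  | f + 1 =>
    match d.getD root none with
    | none => (root, path)
    | some nxt => pvFindGoB f d nxt (path ++ [root])

def pvFindB (fuel : Nat) (d : PySem.Dict (Int × Int) (Option (Int × Int)))
    (v : Int × Int) : (Int × Int) × PySem.Dict (Int × Int) (Option (Int × Int)) :=
  let rp := pvFindGoB fuel d v []
  (rp.1, rp.2.foldl (fun d k => d.insert k (some rp.1)) d)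

def pvKruskalB (verts : List (Int × Int)) (edges : List (Int × (Int × Int) × (Int × Int)))
    (excl : Option (Int × Int)) : Int :=
  let parent := verts.foldl
    (fun d v => if some v = excl then d else d.insert v (none : Option (Int × Int)))
    PySem.Dict.empty
  (edges.foldl (fun st e =>
      if some e.2.1 = excl ∨ some e.2.2 = excl then st
      else
        let ra := pvFindB parent.size st.2 e.2.1
        let rb := pvFindB parent.size ra.2 e.2.2
        if ra.1 ≠ rb.1 then (st.1 + e.1, rb.2.insert rb.1 (some ra.1)) else (st.1, rb.2))
    (0, parent)).1

def pvAllEdgesB : List (Int × Int) → List (Int × (Int × Int) × (Int × Int))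
  | [] => []
  | i :: rest =>
    rest.map (fun j =>
      let ab := if pvPairLt i j then (i, j) else (j, i)
      (|ab.1.1 - ab.2.1| + |ab.1.2 - ab.2.2|, ab.1, ab.2))
    ++ pvAllEdgesB rest

def astar_multiple_cost_alt (curr : Int × Int) (steps : Int) (points : List (Int × Int)) : Int :=
  let verts := PySem.List.dedup points
  let edges := PySem.List.sorted (pvAllEdgesB verts) pvKey false
  let counts := points.foldl (fun d v => d.insert v (d.getD v 0 + 1)) PySem.Dict.empty
  let wfull := pvKruskalB verts edges none
  let best := verts.foldl (fun best p =>
      let w := if (1 : Int) < counts.getD p 0 then wfull else pvKruskalB verts edges (some p)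
      let c := w + (|curr.1 - p.1| + |curr.2 - p.2|) + steps
      match best with
      | none => some c
      | some bv => if c < bv then some c else some bv) none
  best.getD 0  -- Python B returns None on empty points → outside Pre_

-- ===== PRECONDITION & SPEC =====
-- Pre_ excludes only the empty list, on which A raises IndexError (weights[0]).
def Pre_astar_multiple_cost (curr : Int × Int) (steps : Int) (points : List (Int × Int)) : Prop :=
  points ≠ []
instance (curr : Int × Int) (steps : Int) (points : List (Int × Int)) : Decidable (Pre_astar_multiple_cost curr steps points) := by unfold Pre_astar_multiple_cost; infer_instance

def pvWitness_astar_multiple_cost : (Int × Int) × Int × (List (Int × Int)) := ((0, 0), 0, [(1, 2), (3, 4)])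

def Spec_astar_multiple_cost (curr : Int × Int) (steps : Int) (points : List (Int × Int)) (out : Int) : Prop := out = astar_multiple_cost_alt curr steps points
instance (curr : Int × Int) (steps : Int) (points : List (Int × Int)) (out : Int) : Decidable (Spec_astar_multiple_cost curr steps points out) := by unfold Spec_astar_multiple_cost; infer_instance

-- ===== CLAIM (what is proved, stated in full; the proofs are below) =====
def Claim_equal_astar_multiple_cost : Prop := ∀ (curr : Int × Int) (steps : Int) (points : List (Int × Int)), Dom_astar_multiple_cost curr steps points → Pre_astar_multiple_cost curr steps points → Spec_astar_multiple_cost curr steps points (astar_multiple_cost curr steps points)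

-- ===== LEMMAS AND PROOFS =====

-- dictionary states are compared extensionally: union-find only ever looks keys up
abbrev pvD := PySem.Dict (Int × Int) (Option (Int × Int))

def pvRel (d1 d2 : pvD) : Prop := ∀ k, d1.get? k = d2.get? k

theorem pvRel_insert {d1 d2 : pvD} (h : pvRel d1 d2) (k : Int × Int) (v : Option (Int × Int)) :
    pvRel (d1.insert k v) (d2.insert k v) := by
  intro k'
  rw [PySem.Dict.get?_insert, PySem.Dict.get?_insert, h k']

theorem pvGo_congr (f : Nat) (d1 d2 : pvD) (h : pvRel d1 d2) :
    ∀ (r : Int × Int) (p : List (Int × Int)), pvResolveGoA f d1 r p = pvFindGoB f d2 r p := by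
  induction f with
  | zero => intro r p; rfl
  | succ f ih =>
    intro r p
    rw [pvResolveGoA, pvFindGoB, PySem.Dict.getD_eq_get?_getD, PySem.Dict.getD_eq_get?_getD, h r]
    cases (d2.get? r).getD none with
    | none => rfl
    | some nxt => exact ih nxt (p ++ [r])

theorem pvRel_compress (path : List (Int × Int)) (v : Option (Int × Int)) :
    ∀ (d1 d2 : pvD), pvRel d1 d2 →
      pvRel (path.foldl (fun d k => d.insert k v) d1) (path.foldl (fun d k => d.insert k v) d2) := by
  induction path with
  | nil => intro d1 d2 h; exact h
  | cons k t ih => intro d1 d2 h; exact ih _ _ (pvRel_insert h k v)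

theorem pvResolve_congr (f : Nat) (d1 d2 : pvD) (h : pvRel d1 d2) (k : Int × Int) :
    (pvResolveA f d1 k).1 = (pvFindB f d2 k).1 ∧ pvRel (pvResolveA f d1 k).2 (pvFindB f d2 k).2 := by
  unfold pvResolveA pvFindB
  rw [pvGo_congr f d1 d2 h k []]
  exact ⟨rfl, pvRel_compress _ _ _ _ h⟩

def pvStepA (fuel : Nat) (st : Int × pvD) (e : Int × (Int × Int) × (Int × Int)) : Int × pvD :=
  let u := pvUnifyA fuel st.2 e.2.1 e.2.2
  (if u.1 then st.1 + e.1 else st.1, u.2)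

def pvStepB (fuel : Nat) (st : Int × pvD) (e : Int × (Int × Int) × (Int × Int)) : Int × pvD :=
  let ra := pvFindB fuel st.2 e.2.1
  let rb := pvFindB fuel ra.2 e.2.2
  if ra.1 ≠ rb.1 then (st.1 + e.1, rb.2.insert rb.1 (some ra.1)) else (st.1, rb.2)

theorem pvStep_congr (fuel : Nat) (st1 st2 : Int × pvD) (e : Int × (Int × Int) × (Int × Int))
    (hw : st1.1 = st2.1) (hd : pvRel st1.2 st2.2) :
    (pvStepA fuel st1 e).1 = (pvStepB fuel st2 e).1 ∧ pvRel (pvStepA fuel st1 e).2 (pvStepB fuel st2 e).2 := by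
  unfold pvStepA pvStepB pvUnifyA
  obtain ⟨hra, hrd⟩ := pvResolve_congr fuel st1.2 st2.2 hd e.2.1
  obtain ⟨hrb, hrd2⟩ := pvResolve_congr fuel _ _ hrd e.2.2
  simp only [hra, hrb, ne_eq]
  by_cases hc : (pvFindB fuel st2.2 e.2.1).1 = (pvFindB fuel (pvFindB fuel st2.2 e.2.1).2 e.2.2).1
  · rw [if_pos hc, if_neg (not_not_intro hc)]
    exact ⟨by simpa using hw, by simpa using hrd2⟩
  · rw [if_neg hc, if_pos hc]
    exact ⟨by simp [hw], by simpa using pvRel_insert hrd2 _ _⟩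

theorem pvFold_congr (fuel : Nat) (edges : List (Int × (Int × Int) × (Int × Int))) :
    ∀ (st1 st2 : Int × pvD), st1.1 = st2.1 → pvRel st1.2 st2.2 →
      (edges.foldl (pvStepA fuel) st1).1 = (edges.foldl (pvStepB fuel) st2).1 := by
  induction edges with
  | nil => intro st1 st2 hw _; exact hw
  | cons e t ih =>
    intro st1 st2 hw hd
    obtain ⟨hw', hd'⟩ := pvStep_congr fuel st1 st2 e hw hd
    exact ih _ _ hw' hd'

-- a fold whose body skips guarded elements is a fold over the filtered list
theorem pvFoldl_skip {α β : Type} (g : α → Prop) [DecidablePred g] (f : β → α → β) :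
    ∀ (l : List α) (st : β),
      l.foldl (fun st e => if g e then st else f st e) st
        = (l.filter (fun e => !decide (g e))).foldl f st := by
  intro l
  induction l with
  | nil => intro st; rfl
  | cons e t ih =>
    intro st
    by_cases hg : g e
    · simp [hg, ih]
    · simp [hg, ih]

-- get? through the parent-dict building folds
theorem pvGet_foldl_insert_none :
    ∀ (l : List (Int × Int)) (d : pvD) (x : Int × Int),
      (l.foldl (fun d k => d.insert k (none : Option (Int × Int))) d).get? x
        = if x ∈ l then some none else d.get? x := by
  intro l
  induction l with
  | nil => intro d x; simp
  | cons h t ih =>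
    intro d x
    by_cases hx : x ∈ h :: t
    · simp only [List.foldl_cons, ih, if_pos hx]
      rcases List.mem_cons.mp hx with rfl | hxt
      · by_cases hxt : x ∈ t
        · simp [hxt]
        · simp [hxt]
      · simp [hxt]
    · have hxh : x ≠ h := fun he => hx (by simp [he])
      have hxt : x ∉ t := fun he => hx (by simp [he])
      simp [ih, hxt, PySem.Dict.get?_insert, hxh]

-- getD through the distances-dict building fold (every key carries g of itself)
theorem pvGetD_foldl_insert_val (g : (Int × Int) × (Int × Int) → Int) :
    ∀ (l : List ((Int × Int) × (Int × Int))) (d : PySem.Dict ((Int × Int) × (Int × Int)) Int)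
      (x : (Int × Int) × (Int × Int)),
      (l.foldl (fun d ij => d.insert ij (g ij)) d).getD x 0
        = if x ∈ l then g x else d.getD x 0 := by
  intro l
  induction l with
  | nil => intro d x; simp
  | cons h t ih =>
    intro d x
    by_cases hx : x ∈ h :: t
    · simp only [List.foldl_cons, ih, if_pos hx]
      rcases List.mem_cons.mp hx with rfl | hxt
      · by_cases hxt : x ∈ t
        · simp [hxt]
        · simp [hxt]
      · simp [hxt]
    · have hxh : x ≠ h := fun he => hx (by simp [he])
      have hxt : x ∉ t := fun he => hx (by simp [he])
      simp [ih, hxt, PySem.Dict.getD_insert, hxh]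

-- the guarded parent fold of B is the unguarded fold over the filtered vertex list
theorem pvParent_filter (excl : Option (Int × Int)) :
    ∀ (l : List (Int × Int)) (d : pvD),
      l.foldl (fun d v => if some v = excl then d else d.insert v (none : Option (Int × Int))) d
        = (l.filter (fun v => !decide (some v = excl))).foldl
            (fun d v => d.insert v (none : Option (Int × Int))) d := by
  intro l
  induction l with
  | nil => intro d; rfl
  | cons v t ih =>
    intro d
    by_cases hv : some v = excl
    · simp [hv, ih]
    · simp [hv, ih]

theorem pvSize_eq_keys_length (d : pvD) : d.size = d.keys.length := by
  simp [PySem.Dict.size, PySem.Dict.keys]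

theorem pvKeys_foldl_insert_none (l : List (Int × Int)) :
    (l.foldl (fun d k => d.insert k (none : Option (Int × Int))) (PySem.Dict.empty : pvD)).keys
      = PySem.List.dedup l := by
  have h := PySem.Dict.keys_foldl_insert l (fun _ _ => (none : Option (Int × Int)))
    (PySem.Dict.empty : pvD)
  rw [PySem.List.dedup_eq_ofList, ← PySem.Set.update_nil_left l, ← PySem.Dict.keys_empty (κ := Int × Int) (ν := Option (Int × Int))]
  exact h

-- pvPairLt facts
theorem pvPairLt_iff (i j : Int × Int) :
    pvPairLt i j = true ↔ (i.1 < j.1 ∨ (i.1 = j.1 ∧ i.2 < j.2)) := by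
  simp [pvPairLt]

theorem pvPairLt_irrefl (a : Int × Int) : pvPairLt a a = false := by
  simp [pvPairLt]

theorem pvPairLt_trichotomy {a b : Int × Int} (h : a ≠ b) :
    pvPairLt a b = true ∨ pvPairLt b a = true := by
  rw [pvPairLt_iff, pvPairLt_iff]
  rcases a with ⟨a1, a2⟩; rcases b with ⟨b1, b2⟩
  dsimp only
  simp only [ne_eq, Prod.mk.injEq, not_and] at h
  by_cases h1 : a1 = b1
  · have h2 := h h1
    subst h1
    omega
  · omega

theorem pvPairLt_asymm {a b : Int × Int} (h : pvPairLt a b = true) : pvPairLt b a = false := by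
  rw [pvPairLt_iff] at h
  rw [Bool.eq_false_iff, ne_eq, pvPairLt_iff]
  omega

-- cross membership
theorem pv_mem_cross (keys : List (Int × Int)) (t : (Int × Int) × (Int × Int)) :
    t ∈ pvCrossA keys ↔ t.1 ∈ keys ∧ t.2 ∈ keys ∧ pvPairLt t.1 t.2 = true := by
  rcases t with ⟨i, j⟩
  simp only [pvCrossA, List.mem_flatMap, List.mem_map, List.mem_filter]
  constructor
  · rintro ⟨a, ha, b, ⟨hb, hlt⟩, he⟩
    obtain ⟨rfl, rfl⟩ := Prod.mk.injEq .. ▸ he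
    exact ⟨ha, hb, hlt⟩
  · rintro ⟨hi, hj, hlt⟩
    exact ⟨i, hi, j, ⟨hj, hlt⟩, rfl⟩

-- membership in B's global edge list (over a duplicate-free vertex list)
theorem pv_mem_allEdgesB :
    ∀ (verts : List (Int × Int)), verts.Nodup →
      ∀ (t : Int × (Int × Int) × (Int × Int)),
      (t ∈ pvAllEdgesB verts ↔
        ∃ a b, a ∈ verts ∧ b ∈ verts ∧ pvPairLt a b = true ∧ t = (pvManhattan a b, a, b)) := by
  intro verts
  induction verts with
  | nil => intro _ t; simp [pvAllEdgesB]
  | cons v rest ih =>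
    intro hnd t
    have hv : v ∉ rest := (List.nodup_cons.mp hnd).1
    have hndr : rest.Nodup := (List.nodup_cons.mp hnd).2
    simp only [pvAllEdgesB, List.mem_append, List.mem_map, ih hndr]
    constructor
    · rintro (⟨j, hj, rfl⟩ | ⟨a, b, ha, hb, hlt, rfl⟩)
      · have hne : v ≠ j := fun he => hv (he ▸ hj)
        by_cases hlt : pvPairLt v j = true
        · exact ⟨v, j, by simp, by simp [hj], hlt, by simp [hlt, pvManhattan]⟩
        · rcases pvPairLt_trichotomy hne with h' | h'
          · exact absurd h' hlt
          · exact ⟨j, v, by simp [hj], by simp, h', by simp [hlt, pvManhattan]⟩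
      · exact ⟨a, b, by simp [ha], by simp [hb], hlt, rfl⟩
    · rintro ⟨a, b, ha, hb, hlt, rfl⟩
      rcases List.mem_cons.mp ha with rfl | ha'
      · have hbr : b ∈ rest := by
          rcases List.mem_cons.mp hb with rfl | h'
          · rw [pvPairLt_irrefl] at hlt; cases hlt
          · exact h'
        exact Or.inl ⟨b, hbr, by simp [hlt, pvManhattan]⟩
      · rcases List.mem_cons.mp hb with rfl | hb'
        · have : pvPairLt a b = true := hlt
          left
          refine ⟨a, ha', ?_⟩
          have hf : pvPairLt b a = false := pvPairLt_asymm hlt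
          simp [hf, pvManhattan]
        · exact Or.inr ⟨a, b, ha', hb', hlt, rfl⟩

theorem pvKey_inj : Function.Injective pvKey := by
  rintro ⟨d1, ⟨x1, y1⟩, ⟨x2, y2⟩⟩ ⟨e1, ⟨u1, v1⟩, ⟨u2, v2⟩⟩ h
  simp [pvKey] at h
  obtain ⟨rfl, rfl, rfl, rfl, rfl⟩ := h
  rfl

theorem pvNodup_allEdgesB :
    ∀ (verts : List (Int × Int)), verts.Nodup → (pvAllEdgesB verts).Nodup := by
  intro verts
  induction verts with
  | nil => intro _; simp [pvAllEdgesB]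
  | cons v rest ih =>
    intro hnd
    have hv : v ∉ rest := (List.nodup_cons.mp hnd).1
    have hndr : rest.Nodup := (List.nodup_cons.mp hnd).2
    rw [pvAllEdgesB, List.nodup_append]
    refine ⟨?_, ih hndr, ?_⟩
    · refine List.Nodup.map_on ?_ hndr
      intro x hx y hy he
      have h2e := congrArg (fun t => t.2) he
      by_cases h1 : pvPairLt v x = true <;> by_cases h2 : pvPairLt v y = true <;>
        simp only [h1, h2, if_true, if_false, Bool.false_eq_true, Prod.mk.injEq] at h2e
      · exact h2e.2
      · exact absurd (h2e.2 ▸ hx) hv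
      · exact absurd (h2e.1 ▸ hx) hv
      · exact h2e.1
    · intro a ha b hb
      obtain ⟨j, hj, rfl⟩ := List.mem_map.mp ha
      obtain ⟨x, y, hx, hy, hlt, rfl⟩ := (pv_mem_allEdgesB rest hndr b).mp hb
      by_cases h1 : pvPairLt v j = true
      · simp only [h1, if_pos]
        intro he
        simp at he
        obtain ⟨-, he1, -⟩ := he
        exact hv (he1 ▸ hx)
      · simp only [h1]
        intro he
        simp at he
        obtain ⟨-, -, he2⟩ := he
        exact hv (he2 ▸ hy)

theorem pvNodup_triplesA (l : List ((Int × Int) × (Int × Int))) (hnd : l.Nodup) :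
    (l.map (fun ij => (pvManhattan ij.1 ij.2, ij))).Nodup := by
  refine List.Nodup.map ?_ hnd
  intro x y h
  simpa using congrArg Prod.snd h

-- strictly increasing keys in the sorted list of a duplicate-free list
theorem pvSorted_pairwise_lt (xs : List (Int × (Int × Int) × (Int × Int))) (hnd : xs.Nodup) :
    (PySem.List.sorted xs pvKey false).Pairwise (fun a b => pvKey a < pvKey b) := by
  have hle := PySem.List.sorted_pairwise xs pvKey
  have hnd' : (PySem.List.sorted xs pvKey false).Nodup :=
    (PySem.List.sorted_perm xs pvKey false).nodup_iff.mpr hnd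
  have := hnd'.and hle  -- Pairwise (· ≠ · ∧ key ≤)
  refine this.imp ?_
  rintro a b ⟨hne, hle⟩
  exact lt_of_le_of_ne hle (fun he => hne (pvKey_inj he))

-- A's triples list in closed form
theorem pvTriples_closed (objs : List (Int × Int)) :
    ((pvCrossA objs).foldl
        (fun d ij => d.insert ij (pvManhattan ij.1 ij.2)) PySem.Dict.empty).keys.map
      (fun ij => (((pvCrossA objs).foldl
        (fun d ij => d.insert ij (pvManhattan ij.1 ij.2)) PySem.Dict.empty).getD ij 0, ij))
      = (PySem.List.dedup (pvCrossA objs)).map (fun ij => (pvManhattan ij.1 ij.2, ij)) := by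
  have hkeys : ((pvCrossA objs).foldl
      (fun d ij => d.insert ij (pvManhattan ij.1 ij.2)) PySem.Dict.empty).keys
      = PySem.List.dedup (pvCrossA objs) := by
    have h := PySem.Dict.keys_foldl_insert (pvCrossA objs) (fun _ ij => pvManhattan ij.1 ij.2)
      (PySem.Dict.empty : PySem.Dict ((Int × Int) × (Int × Int)) Int)
    rw [PySem.List.dedup_eq_ofList, ← PySem.Set.update_nil_left (pvCrossA objs),
      ← PySem.Dict.keys_empty (κ := (Int × Int) × (Int × Int)) (ν := Int)]
    exact h
  rw [hkeys]
  refine List.map_congr_left ?_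
  intro ij hij
  have hmem : ij ∈ pvCrossA objs := (PySem.List.mem_dedup _ _).mp hij
  rw [pvGetD_foldl_insert_val (fun ij => pvManhattan ij.1 ij.2) (pvCrossA objs)
    PySem.Dict.empty ij, if_pos hmem]

-- count/erase set facts
theorem pv_mem_erase_count_one {points : List (Int × Int)} {p x : Int × Int}
    (hc : points.count p = 1) : x ∈ points.erase p ↔ x ∈ points ∧ x ≠ p := by
  constructor
  · intro hx
    refine ⟨List.mem_of_mem_erase hx, ?_⟩
    rintro rfl
    have h1 := List.count_erase_self (a := x) (l := points)
    have hpos := List.count_pos_iff.mpr hx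
    omega
  · rintro ⟨hx, hne⟩
    exact (List.mem_erase_of_ne hne).mpr hx

theorem pv_mem_erase_count_ge2 {points : List (Int × Int)} {p x : Int × Int}
    (hc : 2 ≤ points.count p) : x ∈ points.erase p ↔ x ∈ points := by
  by_cases hne : x = p
  · subst hne
    have := List.count_erase_self (a := x) (l := points)
    constructor
    · exact List.mem_of_mem_erase
    · intro _; exact List.count_pos_iff.mp (by omega)
  · exact (List.mem_erase_of_ne hne).trans (by simp)

-- the MST weight A computes for a vertex list, re-expressed over closed-form data
theorem pvMstA_eq (objs : List (Int × Int)) :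
    pvMstA objs
      = ((PySem.List.sorted
            ((PySem.List.dedup (pvCrossA objs)).map (fun ij => (pvManhattan ij.1 ij.2, ij)))
            pvKey false).foldl
          (pvStepA (PySem.List.dedup objs).length)
          (0, objs.foldl (fun d k => d.insert k (none : Option (Int × Int))) PySem.Dict.empty)).1 := by
  unfold pvMstA
  dsimp only
  have hsz : (objs.foldl (fun d k => d.insert k (none : Option (Int × Int)))
      (PySem.Dict.empty : pvD)).size = (PySem.List.dedup objs).length := by
    rw [pvSize_eq_keys_length, pvKeys_foldl_insert_none]
  rw [pvTriples_closed objs, hsz]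
  rfl

-- B's kruskal, re-expressed as the congruence-friendly fold
theorem pvKruskalB_eq (verts : List (Int × Int)) (edges : List (Int × (Int × Int) × (Int × Int)))
    (excl : Option (Int × Int)) :
    pvKruskalB verts edges excl
      = ((edges.filter (fun e => !decide (some e.2.1 = excl ∨ some e.2.2 = excl))).foldl
          (pvStepB ((verts.filter (fun v => !decide (some v = excl))).foldl
              (fun d v => d.insert v (none : Option (Int × Int))) PySem.Dict.empty).size)
          (0, (verts.filter (fun v => !decide (some v = excl))).foldl
              (fun d v => d.insert v (none : Option (Int × Int))) PySem.Dict.empty)).1 := by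
  unfold pvKruskalB
  dsimp only
  rw [pvParent_filter excl verts PySem.Dict.empty]
  exact congrArg Prod.fst (pvFoldl_skip (fun e => some e.2.1 = excl ∨ some e.2.2 = excl)
    (pvStepB ((verts.filter (fun v => !decide (some v = excl))).foldl
      (fun d v => d.insert v (none : Option (Int × Int))) PySem.Dict.empty).size) edges _)

-- sorted edge-list equality: A's per-point sorted list is the filtered global sorted list
theorem pvSortedEq (points : List (Int × Int)) (objs : List (Int × Int))
    (excl : Option (Int × Int))
    (hmem : ∀ x, x ∈ objs ↔ (x ∈ points ∧ some x ≠ excl)) :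
    PySem.List.sorted
        ((PySem.List.dedup (pvCrossA objs)).map (fun ij => (pvManhattan ij.1 ij.2, ij)))
        pvKey false
      = (PySem.List.sorted (pvAllEdgesB (PySem.List.dedup points)) pvKey false).filter
          (fun e => !decide (some e.2.1 = excl ∨ some e.2.2 = excl)) := by
  have hndv : (PySem.List.dedup points).Nodup := PySem.List.nodup_dedup points
  have hndB : (pvAllEdgesB (PySem.List.dedup points)).Nodup := pvNodup_allEdgesB _ hndv
  have hndS : (PySem.List.sorted (pvAllEdgesB (PySem.List.dedup points)) pvKey false).Nodup :=
    (PySem.List.sorted_perm (pvAllEdgesB (PySem.List.dedup points)) pvKey false).nodup_iff.mpr hndB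
  have hplt := pvSorted_pairwise_lt (pvAllEdgesB (PySem.List.dedup points)) hndB
  refine PySem.List.sorted_eq_of_perm_of_pairwise_lt _ _ _ ?_ ?_
  · -- the filtered sorted global list is a permutation of A's triples
    refine (List.perm_ext_iff_of_nodup (hndS.filter _) ?_).mpr ?_
    · exact pvNodup_triplesA _ (PySem.List.nodup_dedup _)
    · intro t
      rw [List.mem_filter, PySem.List.mem_sorted]
      constructor
      · rintro ⟨htB, hkeep⟩
        obtain ⟨a, b, ha, hb, hlt, rfl⟩ := (pv_mem_allEdgesB _ hndv t).mp htB
        simp only [Bool.not_eq_true', decide_eq_false_iff_not, not_or] at hkeep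
        have ha' : a ∈ objs := (hmem a).mpr ⟨(PySem.List.mem_dedup _ _).mp ha, hkeep.1⟩
        have hb' : b ∈ objs := (hmem b).mpr ⟨(PySem.List.mem_dedup _ _).mp hb, hkeep.2⟩
        refine List.mem_map.mpr ⟨(a, b), ?_, rfl⟩
        rw [PySem.List.mem_dedup, pv_mem_cross]
        exact ⟨ha', hb', hlt⟩
      · intro ht
        obtain ⟨ij, hij, rfl⟩ := List.mem_map.mp ht
        rw [PySem.List.mem_dedup, pv_mem_cross] at hij
        obtain ⟨hi, hj, hlt⟩ := hij
        have hi' := (hmem ij.1).mp hi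
        have hj' := (hmem ij.2).mp hj
        constructor
        · exact (pv_mem_allEdgesB _ hndv _).mpr
            ⟨ij.1, ij.2, (PySem.List.mem_dedup _ _).mpr hi'.1,
              (PySem.List.mem_dedup _ _).mpr hj'.1, hlt, rfl⟩
        · simp only [Bool.not_eq_true', decide_eq_false_iff_not, not_or]
          exact ⟨hi'.2, hj'.2⟩
  · exact hplt.sublist List.filter_sublist

-- the per-point weight equality: A's freshly built MST equals B's reused-global-list kruskal
theorem pvMst_eq_kruskalB (points objs : List (Int × Int)) (excl : Option (Int × Int))
    (hmem : ∀ x, x ∈ objs ↔ (x ∈ points ∧ some x ≠ excl)) :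
    pvMstA objs
      = pvKruskalB (PySem.List.dedup points)
          (PySem.List.sorted (pvAllEdgesB (PySem.List.dedup points)) pvKey false) excl := by
  rw [pvMstA_eq objs, pvKruskalB_eq, pvSortedEq points objs excl hmem]
  have hmem2 : ∀ x, (x ∈ PySem.List.dedup objs)
      ↔ (x ∈ ((PySem.List.dedup points).filter (fun v => !decide (some v = excl)))) := by
    intro x
    rw [PySem.List.mem_dedup, List.mem_filter, PySem.List.mem_dedup, hmem x]
    simp
  have hlen : (PySem.List.dedup objs).length
      = (((PySem.List.dedup points).filter (fun v => !decide (some v = excl))).foldl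
          (fun d v => d.insert v (none : Option (Int × Int))) PySem.Dict.empty).size := by
    rw [pvSize_eq_keys_length, pvKeys_foldl_insert_none]
    refine List.Perm.length_eq ?_
    refine (List.perm_ext_iff_of_nodup (PySem.List.nodup_dedup _) (PySem.List.nodup_dedup _)).mpr ?_
    intro x
    rw [PySem.List.mem_dedup ((PySem.List.dedup points).filter _) x]
    exact hmem2 x
  rw [hlen]
  refine pvFold_congr _ _ _ _ rfl ?_
  intro k
  rw [pvGet_foldl_insert_none, pvGet_foldl_insert_none]
  have hiff : k ∈ objs ↔ k ∈ (PySem.List.dedup points).filter (fun v => !decide (some v = excl)) :=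
    (PySem.List.mem_dedup objs k).symm.trans (hmem2 k)
  by_cases hk : k ∈ objs
  · rw [if_pos hk, if_pos (hiff.mp hk)]
  · rw [if_neg hk, if_neg (fun hc => hk (hiff.mpr hc))]

-- the per-point weight equality, in the exact shape both ports use it
theorem pvCost_eq (points : List (Int × Int)) (p : Int × Int) (hp : p ∈ points) :
    pvMstA ((PySem.List.remove? points p).getD [])
      = (if (1 : Int) < ((points.foldl (fun d v => d.insert v (d.getD v 0 + 1))
            PySem.Dict.empty).getD p 0)
         then pvKruskalB (PySem.List.dedup points)
                (PySem.List.sorted (pvAllEdgesB (PySem.List.dedup points)) pvKey false) none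
         else pvKruskalB (PySem.List.dedup points)
                (PySem.List.sorted (pvAllEdgesB (PySem.List.dedup points)) pvKey false) (some p)) := by
  rw [PySem.List.remove?_eq_some_erase points p hp, Option.getD_some]
  rw [PySem.Dict.foldl_insert_getD_add_one_eq_counter, PySem.Dict.getD_counter]
  have hpos : 1 ≤ points.count p := List.count_pos_iff.mpr hp
  by_cases hc : 2 ≤ points.count p
  · rw [if_pos (by exact_mod_cast by omega)]
    refine pvMst_eq_kruskalB points (points.erase p) none ?_
    intro x
    rw [pv_mem_erase_count_ge2 hc]
    simp
  · have hc1 : points.count p = 1 := by omega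
    rw [if_neg (by exact_mod_cast by omega)]
    refine pvMst_eq_kruskalB points (points.erase p) (some p) ?_
    intro x
    rw [pv_mem_erase_count_one hc1]
    simp

-- running-minimum fold of B, characterized
theorem pvFoldMin_go (f : (Int × Int) → Int) :
    ∀ (t : List (Int × Int)) (b : Int),
      ∃ M, t.foldl (fun best p => match best with
            | none => some (f p)
            | some bv => if f p < bv then some (f p) else some bv) (some b) = some M
        ∧ (M = b ∨ ∃ q ∈ t, M = f q) ∧ M ≤ b ∧ ∀ q ∈ t, M ≤ f q := by
  intro t
  induction t with
  | nil => intro b; exact ⟨b, rfl, Or.inl rfl, le_refl b, by simp⟩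
  | cons v t ih =>
    intro b
    by_cases hv : f v < b
    · obtain ⟨M, hM, hmem, hle, hlb⟩ := ih (f v)
      refine ⟨M, by simpa [hv] using hM, ?_, (lt_of_le_of_lt hle hv).le, ?_⟩
      · rcases hmem with rfl | ⟨q, hq, rfl⟩
        · exact Or.inr ⟨v, by simp, rfl⟩
        · exact Or.inr ⟨q, by simp [hq], rfl⟩
      · intro q hq
        rcases List.mem_cons.mp hq with rfl | hq'
        · exact hle
        · exact hlb q hq'
    · obtain ⟨M, hM, hmem, hle, hlb⟩ := ih b
      refine ⟨M, by simpa [hv] using hM, ?_, hle, ?_⟩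
      · rcases hmem with rfl | ⟨q, hq, rfl⟩
        · exact Or.inl rfl
        · exact Or.inr ⟨q, by simp [hq], rfl⟩
      · intro q hq
        rcases List.mem_cons.mp hq with rfl | hq'
        · exact le_trans hle (not_lt.mp hv)
        · exact hlb q hq'

theorem pvFoldMin_spec (f : (Int × Int) → Int) (l : List (Int × Int)) (hne : l ≠ []) :
    ∃ M, l.foldl (fun best p => match best with
          | none => some (f p)
          | some bv => if f p < bv then some (f p) else some bv) none = some M
      ∧ (∃ q ∈ l, M = f q) ∧ ∀ q ∈ l, M ≤ f q := by
  cases l with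
  | nil => exact absurd rfl hne
  | cons v t =>
    obtain ⟨M, hM, hmem, hle, hlb⟩ := pvFoldMin_go f t (f v)
    refine ⟨M, hM, ?_, ?_⟩
    · rcases hmem with rfl | ⟨q, hq, rfl⟩
      · exact ⟨v, by simp, rfl⟩
      · exact ⟨q, by simp [hq], rfl⟩
    · intro q hq
      rcases List.mem_cons.mp hq with rfl | hq'
      · exact hle
      · exact hlb q hq'

-- head of the sorted list is the minimum
theorem pvHead_min (ws : List Int) (hne : ws ≠ []) :
    ∃ m, PySem.List.pyGetD (PySem.List.sorted ws (fun x => x) false) 0 0 = m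
      ∧ m ∈ ws ∧ ∀ y ∈ ws, m ≤ y := by
  cases hs : PySem.List.sorted ws (fun x => x) false with
  | nil => exact absurd ((PySem.List.sorted_eq_nil_iff ws _ false).mp hs) hne
  | cons m t =>
    refine ⟨m, PySem.List.pyGetD_zero_cons m t 0, ?_, ?_⟩
    · exact (PySem.List.mem_sorted ws (fun x => x) false m).mp (hs ▸ List.mem_cons_self)
    · exact PySem.List.key_head_sorted_le ws (fun x => x) hs

theorem pv_main : ∀ (curr : Int × Int) (steps : Int) (points : List (Int × Int)),
    points ≠ [] → astar_multiple_cost curr steps points = astar_multiple_cost_alt curr steps points := by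
  intro curr steps points hne
  have ha : astar_multiple_cost curr steps points
      = PySem.List.pyGetD (PySem.List.sorted (points.map (fun point =>
          pvMstA ((PySem.List.remove? points point).getD []) + pvManhattan curr point + steps))
          (fun x => x) false) 0 0 := by
    show PySem.List.pyGetD (PySem.List.sorted (points.foldl (fun ws point =>
        ws ++ [pvMstA ((PySem.List.remove? points point).getD []) + pvManhattan curr point + steps]) [])
        (fun x => x) false) 0 0 = _
    rw [PySem.List.foldl_append_singleton_eq_map]
    simp
  have hb : astar_multiple_cost_alt curr steps points
      = ((PySem.List.dedup points).foldl (fun best p => match best with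
          | none => some ((fun p => (if (1 : Int) < ((points.foldl
              (fun d v => d.insert v (d.getD v 0 + 1)) PySem.Dict.empty).getD p 0)
              then pvKruskalB (PySem.List.dedup points)
                (PySem.List.sorted (pvAllEdgesB (PySem.List.dedup points)) pvKey false) none
              else pvKruskalB (PySem.List.dedup points)
                (PySem.List.sorted (pvAllEdgesB (PySem.List.dedup points)) pvKey false) (some p))
              + pvManhattan curr p + steps) p)
          | some bv => if ((fun p => (if (1 : Int) < ((points.foldl
              (fun d v => d.insert v (d.getD v 0 + 1)) PySem.Dict.empty).getD p 0)
              then pvKruskalB (PySem.List.dedup points)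
                (PySem.List.sorted (pvAllEdgesB (PySem.List.dedup points)) pvKey false) none
              else pvKruskalB (PySem.List.dedup points)
                (PySem.List.sorted (pvAllEdgesB (PySem.List.dedup points)) pvKey false) (some p))
              + pvManhattan curr p + steps) p) < bv
              then some ((fun p => (if (1 : Int) < ((points.foldl
              (fun d v => d.insert v (d.getD v 0 + 1)) PySem.Dict.empty).getD p 0)
              then pvKruskalB (PySem.List.dedup points)
                (PySem.List.sorted (pvAllEdgesB (PySem.List.dedup points)) pvKey false) none
              else pvKruskalB (PySem.List.dedup points)
                (PySem.List.sorted (pvAllEdgesB (PySem.List.dedup points)) pvKey false) (some p))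
              + pvManhattan curr p + steps) p) else some bv) none).getD 0 := rfl
  have hvne : PySem.List.dedup points ≠ [] := by
    intro hd
    obtain ⟨v, hv⟩ := List.exists_mem_of_ne_nil points hne
    have : v ∈ PySem.List.dedup points := (PySem.List.mem_dedup points v).mpr hv
    rw [hd] at this
    exact absurd this List.not_mem_nil
  have hwne : points.map (fun point =>
      pvMstA ((PySem.List.remove? points point).getD []) + pvManhattan curr point + steps) ≠ [] := by
    simpa using hne
  obtain ⟨m, hm, hmmem, hmlb⟩ := pvHead_min _ hwne
  obtain ⟨M, hM, hMmem, hMlb⟩ := pvFoldMin_spec (fun p => (if (1 : Int) < ((points.foldl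
      (fun d v => d.insert v (d.getD v 0 + 1)) PySem.Dict.empty).getD p 0)
      then pvKruskalB (PySem.List.dedup points)
        (PySem.List.sorted (pvAllEdgesB (PySem.List.dedup points)) pvKey false) none
      else pvKruskalB (PySem.List.dedup points)
        (PySem.List.sorted (pvAllEdgesB (PySem.List.dedup points)) pvKey false) (some p))
      + pvManhattan curr p + steps) (PySem.List.dedup points) hvne
  rw [ha, hb, hm, hM, Option.getD_some]
  -- the two minima agree
  obtain ⟨pt, hpt, rfl⟩ := List.mem_map.mp hmmem
  obtain ⟨q, hq, rfl⟩ := hMmem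
  have hq' : q ∈ points := (PySem.List.mem_dedup points q).mp hq
  refine le_antisymm ?_ ?_
  · have := hmlb _ (List.mem_map.mpr ⟨q, hq', rfl⟩)
    rw [pvCost_eq points q hq'] at this
    exact this
  · have := hMlb pt ((PySem.List.mem_dedup points pt).mpr hpt)
    rw [pvCost_eq points pt hpt]
    exact this

-- ===== VERDICT (by name: the statement is the Claim_ definition above) =====
theorem astar_multiple_cost_spec : Claim_equal_astar_multiple_cost := by
  intro curr steps points _ hpre
  exact pv_main curr steps points hpre
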